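-- pv_equiv track=rewrite | github.com/AbbyBeeler/cs4300sp2020-am2278-arb379-ch629-srl84 | app/data/formatting.py | generate_speakers_dict
-- ===== SOURCE A (Python) =====
-- def generate_speakers_dict(debate):
--     speakers = set(debate['candidates'] + debate['other_speakers'])
--     parts_to_name = dict()
--     name_to_parts = dict()
--     for name in speakers:
--         # get all parts of the name
--         name_to_parts[name] = set(name.lower().split(' '))
--         # create a reverse dictionary: part of the name to full name
--         for name_part in name_to_parts[name]:
--             if name_part in parts_to_name:
--                 parts_to_name[name_part] = None
--             else:
--                 parts_to_name[name_part] = name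
--
--     # remove names that can point to multiple people
--     parts_to_name = {k: v for k, v in parts_to_name.items() if v is not None}
--     return parts_to_name, name_to_parts
-- ===== SOURCE B (Python) =====
-- def generate_speakers_dict(debate):
--     speakers = set(debate['candidates'] + debate['other_speakers'])
--     # pass 1: name -> its set of lowercase name parts
--     name_to_parts = {}
--     for name in speakers:
--         name_to_parts[name] = set(name.lower().split(' '))
--     # pass 2: how many speakers each part belongs to
--     counts = {}
--     for name in speakers:
--         for part in name_to_parts[name]:
--             counts[part] = counts.get(part, 0) + 1
--     # pass 3: keep only unambiguous parts
--     parts_to_name = {}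
--     for name in speakers:
--         for part in name_to_parts[name]:
--             if counts.get(part, 0) == 1:
--                 parts_to_name[part] = name
--     return parts_to_name, name_to_parts
-- ===== Notes on version B (the rewrite author's own statement) =====
-- stated objective: alternative
-- what changed: Replaces A's single interleaved loop that marks ambiguous name parts with a None sentinel and filters afterwards by three separate passes: build name_to_parts, count in how many names each part occurs, then build parts_to_name directly by keeping only parts with count 1 (no sentinel, no post-filter).
import Mathlib
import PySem

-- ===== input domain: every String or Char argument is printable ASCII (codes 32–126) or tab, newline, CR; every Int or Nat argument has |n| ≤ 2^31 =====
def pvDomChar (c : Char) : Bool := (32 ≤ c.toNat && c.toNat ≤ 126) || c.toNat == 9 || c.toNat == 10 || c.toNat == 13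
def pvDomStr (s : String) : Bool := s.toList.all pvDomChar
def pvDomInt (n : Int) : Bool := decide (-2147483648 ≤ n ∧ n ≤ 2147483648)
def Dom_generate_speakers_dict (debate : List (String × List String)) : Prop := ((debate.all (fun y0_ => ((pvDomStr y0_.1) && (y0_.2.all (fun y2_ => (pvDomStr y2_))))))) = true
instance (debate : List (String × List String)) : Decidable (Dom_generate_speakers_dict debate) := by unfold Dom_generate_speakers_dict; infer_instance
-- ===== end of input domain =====

-- B replaces A's sentinel-marking loop by a count-then-filter decomposition (same cost);
-- the proved equivalence is about the RETURN value (neither program mutates its argument).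

-- ===== PORT A =====
-- shared with B's port: both Pythons compute set(name.lower().split(' ')) and the speaker set
def pvParts (name : String) : PySem.Set String :=
  PySem.Set.ofList ((PySem.Str.split? (PySem.Str.lower name) " ").getD [])

def pvSpeakers (debate : List (String × List String)) : PySem.Set String :=
  PySem.Set.ofList ((PySem.Dict.mk debate).getD "candidates" []
                    ++ (PySem.Dict.mk debate).getD "other_speakers" [])

-- one step of A's inner loop over the parts of `name`
def pvStepA (name : String) (ptn : PySem.Dict String (Option String)) (p : String) :
    PySem.Dict String (Option String) :=
  if ptn.contains p then ptn.insert p none else ptn.insert p (some name)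

-- one step of A's final dict comprehension {k: v for k, v in parts_to_name.items() if v is not None}
def pvCleanStep (acc : PySem.Dict String String) (kv : String × Option String) :
    PySem.Dict String String :=
  match kv.2 with
  | some v => acc.insert kv.1 v
  | none => acc

def generate_speakers_dict (debate : List (String × List String)) :
    (List (String × String)) × (List (String × List String)) :=
  let st := (pvSpeakers debate).foldl
      (fun st name => ((pvParts name).foldl (pvStepA name) st.1, st.2.insert name (pvParts name)))
      ((PySem.Dict.empty : PySem.Dict String (Option String)),
       (PySem.Dict.empty : PySem.Dict String (List String)))
  let ptn := st.1.items.foldl pvCleanStep PySem.Dict.empty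
  (ptn.items, st.2.items)

-- ===== PORT B =====
def generate_speakers_dict_alt (debate : List (String × List String)) :
    (List (String × String)) × (List (String × List String)) :=
  let speakers := pvSpeakers debate
  -- pass 1: name -> its set of lowercase name parts
  let ntp := speakers.foldl (fun d name => d.insert name (pvParts name))
      (PySem.Dict.empty : PySem.Dict String (List String))
  -- pass 2: how many speakers each part belongs to
  let counts := speakers.foldl
      (fun c name => (ntp.getD name []).foldl (fun c p => c.insert p (c.getD p 0 + 1)) c)
      (PySem.Dict.empty : PySem.Dict String Int)
  -- pass 3: keep only unambiguous parts
  let ptn := speakers.foldl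
      (fun d name => (ntp.getD name []).foldl
        (fun (d : PySem.Dict String String) p =>
          if counts.getD p 0 == 1 then d.insert p name else d) d)
      PySem.Dict.empty
  (ptn.items, ntp.items)

-- ===== PRECONDITION & SPEC =====
-- A does debate['candidates'] and debate['other_speakers']: Pre_ requires both keys (KeyError otherwise)
def Pre_generate_speakers_dict (debate : List (String × List String)) : Prop :=
  (PySem.Dict.mk debate).contains "candidates" = true ∧
  (PySem.Dict.mk debate).contains "other_speakers" = true
instance (debate : List (String × List String)) : Decidable (Pre_generate_speakers_dict debate) := by
  unfold Pre_generate_speakers_dict; infer_instance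

def pvWitness_generate_speakers_dict : (List (String × List String)) :=
  [("candidates", ["Al Gore", "George W. Bush"]), ("other_speakers", ["Jim Lehrer"])]

def Spec_generate_speakers_dict (debate : List (String × List String)) (out : (List (String × String)) × (List (String × List String))) : Prop := out = generate_speakers_dict_alt debate
instance (debate : List (String × List String)) (out : (List (String × String)) × (List (String × List String))) : Decidable (Spec_generate_speakers_dict debate out) := by unfold Spec_generate_speakers_dict; infer_instance

-- ===== CLAIM (what is proved, stated in full; the proofs are below) =====
def Claim_equal_generate_speakers_dict : Prop := ∀ (debate : List (String × List String)), Dom_generate_speakers_dict debate → Pre_generate_speakers_dict debate → Spec_generate_speakers_dict debate (generate_speakers_dict debate)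

-- ===== LEMMAS AND PROOFS =====

-- the (part, name) pairs both programs process, in processing order
def pvPairs (S : List String) : List (String × String) :=
  S.flatMap (fun n => (pvParts n).map (fun p => (p, n)))

-- closed form of A's parts_to_name dict before filtering
def pvSpec : List (String × String) → List (String × Option String)
  | [] => []
  | (p, n) :: rest =>
      (p, if rest.any (fun x => x.1 == p) then none else some n) ::
        pvSpec (rest.filter (fun x => x.1 != p))
termination_by L => L.length
decreasing_by
  simp
  have h := List.length_filter_le (fun (x : {x // x ∈ rest}) => x.1.1 != p) rest.attach
  simpa using h

def pvClean (l : List (String × Option String)) : List (String × String) :=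
  l.filterMap (fun kv => kv.2.map (fun v => (kv.1, v)))

def pvKeep (L : List (String × String)) (x : String × String) : Bool :=
  (L.map Prod.fst).count x.1 == 1

theorem pv_count (l : List (String × String)) (a : String) :
    List.count a (l.map Prod.fst) = l.countP (fun x => x.1 == a) := by
  simp [List.count_eq_countP, List.countP_map]; rfl

theorem pv_gen (L : List (String × String)) (d : PySem.Dict String (Option String)) :
    (L.foldl (fun d x => pvStepA x.2 d x.1) d).items
      = d.items.map (fun kv => if L.any (fun x => x.1 == kv.1) then (kv.1, (none : Option String)) else kv)
        ++ pvSpec (L.filter (fun x => !(d.contains x.1))) := by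
  induction L generalizing d with
  | nil => simp [pvSpec]
  | cons x L ih =>
    obtain ⟨p, n⟩ := x
    rw [List.foldl_cons, ih]
    by_cases h : d.contains (p, n).1 = true
    · have hstep : pvStepA (p, n).2 d (p, n).1 = d.insert p none := by
        simp [pvStepA, h]
      rw [hstep]
      have hmap : ((d.insert p none).items.map
            (fun kv => if L.any (fun z => z.1 == kv.1) then (kv.1, (none : Option String)) else kv))
          = d.items.map (fun kv => if ((p, n) :: L).any (fun z => z.1 == kv.1) then (kv.1, (none : Option String)) else kv) := by
        rw [PySem.Dict.items_insert_of_contains d none h, List.map_map]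
        apply List.map_congr_left
        intro q hq
        simp only [Function.comp_apply]
        by_cases hq1 : q.1 = p
        · have hi : (if (q.1 == (p, n).1) = true then ((p, n).1, (none : Option String)) else q)
              = ((p : String), (none : Option String)) := by
            rw [if_pos (beq_iff_eq.mpr hq1)]
          rw [hi]
          show (if (L.any fun z => z.1 == p) = true
              then ((p : String), (none : Option String)) else (p, none)) = _
          rw [ite_self]
          have hcc : (((p, n) :: L).any fun z => z.1 == q.1) = true := by
            show ((p == q.1) || (L.any fun z => z.1 == q.1)) = true
            rw [show (p == q.1) = true from beq_iff_eq.mpr hq1.symm, Bool.true_or]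
          rw [hcc, hq1]
          exact (if_pos rfl).symm
        · have hi : (if (q.1 == (p, n).1) = true then ((p, n).1, (none : Option String)) else q) = q := by
            rw [if_neg (fun hcc => hq1 (beq_iff_eq.mp hcc))]
          rw [hi]
          have hcc : (((p, n) :: L).any fun z => z.1 == q.1) = (L.any fun z => z.1 == q.1) := by
            show ((p == q.1) || (L.any fun z => z.1 == q.1)) = _
            rw [beq_eq_false_iff_ne.mpr (Ne.symm hq1), Bool.false_or]
          rw [hcc]
      have hfil : L.filter (fun z => !(d.insert p none).contains z.1)
          = (((p, n) :: L).filter (fun z => !(d.contains z.1))) := by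
        rw [List.filter_cons]
        simp only [h, Bool.not_true]
        apply List.filter_congr
        intro z hz
        by_cases hz1 : z.1 = p
        · simp [hz1, h]
        · simp [PySem.Dict.contains_insert, hz1]
      rw [hmap, hfil]
    · have h' : d.contains p = false := by simpa using h
      have hstep : pvStepA (p, n).2 d (p, n).1 = d.insert p (some n) := by
        simp [pvStepA, h']
      rw [hstep, PySem.Dict.items_insert_of_not_contains d _ h', List.map_append]
      have hqne : ∀ q ∈ d.items, q.1 ≠ p := by
        intro q hq hqx
        have hc : d.contains p = true := by
          rw [PySem.Dict.contains_iff_mem_keys]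
          rw [← hqx]
          exact List.mem_map_of_mem hq
        rw [h'] at hc
        exact Bool.false_ne_true hc
      have hmap2 : d.items.map (fun kv => if L.any (fun z => z.1 == kv.1) then (kv.1, (none : Option String)) else kv)
          = d.items.map (fun kv => if ((p, n) :: L).any (fun z => z.1 == kv.1) then (kv.1, (none : Option String)) else kv) := by
        apply List.map_congr_left
        intro q hq
        have hcc : (((p, n) :: L).any fun z => z.1 == q.1) = (L.any fun z => z.1 == q.1) := by
          show ((p == q.1) || (L.any fun z => z.1 == q.1)) = _
          rw [beq_eq_false_iff_ne.mpr (Ne.symm (hqne q hq)), Bool.false_or]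
        rw [hcc]
      have hfil2 : ((p, n) :: L).filter (fun z => !(d.contains z.1))
          = (p, n) :: L.filter (fun z => !(d.contains z.1)) := by
        simp [h']
      rw [hmap2, hfil2, pvSpec]
      have hcond : (L.filter (fun z => !(d.contains z.1))).any (fun z => z.1 == p)
          = L.any (fun z => z.1 == p) := by
        rw [List.any_filter]
        congr 1
        funext z
        by_cases hz : z.1 = p
        · simp [hz, h']
        · simp [hz]
      have htail2 : L.filter (fun z => !(d.insert p (some n)).contains z.1)
          = (L.filter (fun z => !(d.contains z.1))).filter (fun z => z.1 != p) := by
        rw [List.filter_filter]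
        apply List.filter_congr
        intro z hz
        by_cases hz1 : z.1 = p <;> simp [PySem.Dict.contains_insert, hz1, h', bne]
      rw [hcond, htail2]
      simp [apply_ite]

theorem pv_keep_cons (p n : String) (rest : List (String × String)) (x : String × String)
    (hx : x ∈ rest) :
    pvKeep ((p, n) :: rest) x
      = ((x.1 != p) && pvKeep (rest.filter (fun y => y.1 != p)) x) := by
  by_cases hxp : x.1 = p
  · simp [pvKeep, pv_count, hxp]
    exact ⟨x.2, by rw [← hxp]; simpa using hx⟩
  · have hcong : rest.countP (fun y => (y.1 == x.1) && (y.1 != p)) = rest.countP (fun y => y.1 == x.1) := by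
      apply List.countP_congr
      intro y hy
      by_cases h : y.1 = x.1 <;> simp [h, hxp]
    simp [pvKeep, pv_count, List.countP_filter, hxp, Ne.symm hxp, hcong]

theorem pv_tail (p n : String) (rest : List (String × String)) :
    rest.filter (pvKeep ((p, n) :: rest))
      = (rest.filter (fun x => x.1 != p)).filter (pvKeep (rest.filter (fun x => x.1 != p))) := by
  rw [List.filter_filter]
  apply List.filter_congr
  intro x hx
  rw [pv_keep_cons p n rest x hx, Bool.and_comm]

theorem pv_spec_clean_aux : ∀ (N : Nat) (L : List (String × String)), L.length ≤ N →
    pvClean (pvSpec L) = L.filter (pvKeep L) := by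
  intro N
  induction N with
  | zero =>
    intro L hL
    have hnil : L = [] := List.eq_nil_of_length_eq_zero (Nat.le_zero.mp hL)
    subst hnil
    simp [pvSpec, pvClean]
  | succ N ih =>
    intro L hL
    match L with
    | [] => simp [pvSpec, pvClean]
    | (p, n) :: rest =>
      have hr' : (rest.filter (fun x => x.1 != p)).length ≤ N := by
        have h1 := List.length_filter_le (fun x : String × String => x.1 != p) rest
        have h2 : rest.length + 1 ≤ N + 1 := by simpa using hL
        omega
      rw [pvSpec]
      cases hc : rest.any (fun x => x.1 == p) with
      | false =>
        have hc0 : rest.countP (fun x => x.1 == p) = 0 := by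
          rw [List.countP_eq_zero]
          intro a ha
          have := List.any_eq_false.mp hc a ha
          simpa using this
        have hhead : pvKeep ((p, n) :: rest) (p, n) = true := by
          simp [pvKeep, pv_count, hc0]
        rw [List.filter_cons_of_pos hhead]
        show (p, n) :: pvClean (pvSpec (rest.filter (fun x => x.1 != p))) = _
        rw [ih _ hr', ← pv_tail p n rest]
      | true =>
        have hhead : pvKeep ((p, n) :: rest) (p, n) = false := by
          simp [pvKeep, pv_count]
          obtain ⟨a, ha, hap⟩ := List.any_eq_true.mp hc
          have ha1 : a.1 = p := by simpa using hap
          exact ⟨a.2, by rw [← ha1]; simpa using ha⟩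
        rw [List.filter_cons_of_neg (by simp [hhead])]
        show pvClean (pvSpec (rest.filter (fun x => x.1 != p))) = _
        rw [ih _ hr', ← pv_tail p n rest]

theorem pv_spec_clean (L : List (String × String)) :
    pvClean (pvSpec L) = L.filter (pvKeep L) :=
  pv_spec_clean_aux L.length L (le_refl _)

theorem pv_keep_nodup (L : List (String × String)) :
    ((L.filter (pvKeep L)).map Prod.fst).Nodup := by
  rw [List.nodup_iff_count_le_one]
  intro a
  by_cases ha : a ∈ (L.filter (pvKeep L)).map Prod.fst
  · obtain ⟨x, hx, rfl⟩ := List.mem_map.mp ha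
    have hk : pvKeep L x = true := (List.mem_filter.mp hx).2
    have h1 : List.count x.1 (L.map Prod.fst) = 1 := by
      simpa [pvKeep] using hk
    have hsub : ((L.filter (pvKeep L)).map Prod.fst).Sublist (L.map Prod.fst) :=
      List.Sublist.map Prod.fst List.filter_sublist
    calc List.count x.1 ((L.filter (pvKeep L)).map Prod.fst)
        ≤ List.count x.1 (L.map Prod.fst) := hsub.count_le _
      _ = 1 := h1
  · simp [List.count_eq_zero_of_not_mem ha]

theorem pv_fresh (K : List (String × String)) (h : (K.map Prod.fst).Nodup) :
    (K.foldl (fun d kv => d.insert kv.1 kv.2) (PySem.Dict.empty : PySem.Dict String String)).items = K := by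
  have h0 : ∀ a ∈ K, (PySem.Dict.empty : PySem.Dict String String).contains a.1 = false :=
    fun a _ => PySem.Dict.contains_empty _
  have hmain := PySem.Dict.items_foldl_insert_fresh K Prod.fst Prod.snd PySem.Dict.empty h0 h
  simpa using hmain

theorem pv_match_fold (l : List (String × Option String)) (acc : PySem.Dict String String) :
    l.foldl pvCleanStep acc
      = (pvClean l).foldl (fun acc kv => acc.insert kv.1 kv.2) acc := by
  induction l generalizing acc with
  | nil => rfl
  | cons kv rest ih =>
    obtain ⟨k, v?⟩ := kv
    cases v? <;> simp [pvCleanStep, pvClean, ih]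

theorem pv_ntp (S : List String) (hnd : S.Nodup) :
    (S.foldl (fun d name => d.insert name (pvParts name))
        (PySem.Dict.empty : PySem.Dict String (List String))).items
      = S.map (fun n => (n, pvParts n)) := by
  have h0 : ∀ a ∈ S, (PySem.Dict.empty : PySem.Dict String (List String)).contains a = false :=
    fun a _ => PySem.Dict.contains_empty _
  have hmain := PySem.Dict.items_foldl_insert_fresh S (fun n => n) (fun n => pvParts n)
      PySem.Dict.empty h0 (by simpa using hnd)
  simpa using hmain

theorem pv_ntp_getD (S : List String) (hnd : S.Nodup) (n : String) (hn : n ∈ S) :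
    (S.foldl (fun d name => d.insert name (pvParts name))
        (PySem.Dict.empty : PySem.Dict String (List String))).getD n [] = pvParts n := by
  have hitems := pv_ntp S hnd
  have hkeys : (S.foldl (fun d name => d.insert name (pvParts name))
      (PySem.Dict.empty : PySem.Dict String (List String))).keys.Nodup := by
    simp only [PySem.Dict.keys, hitems]
    simpa [Function.comp_def] using hnd
  have hmem : (n, pvParts n) ∈ (S.foldl (fun d name => d.insert name (pvParts name))
      (PySem.Dict.empty : PySem.Dict String (List String))).items := by
    rw [hitems]; exact List.mem_map_of_mem hn
  exact PySem.Dict.getD_of_mem_items _ hmem hkeys []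

theorem pv_prod (S : List String) (a : PySem.Dict String (Option String))
    (b : PySem.Dict String (List String)) :
    S.foldl (fun st name => ((pvParts name).foldl (pvStepA name) st.1, st.2.insert name (pvParts name))) (a, b)
      = (S.foldl (fun acc n => (pvParts n).foldl (pvStepA n) acc) a,
         S.foldl (fun d n => d.insert n (pvParts n)) b) :=
  PySem.List.foldl_prod_mk (fun acc n => (pvParts n).foldl (pvStepA n) acc)
    (fun d n => d.insert n (pvParts n)) S a b

theorem pv_nestedA (S : List String) (init : PySem.Dict String (Option String)) :
    S.foldl (fun acc n => (pvParts n).foldl (pvStepA n) acc) init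
      = (pvPairs S).foldl (fun d x => pvStepA x.2 d x.1) init := by
  simp [pvPairs, List.foldl_flatMap, List.foldl_map]

theorem pv_nestedC (S : List String) (init : PySem.Dict String Int) :
    S.foldl (fun c n => (pvParts n).foldl (fun c p => c.insert p (c.getD p 0 + 1)) c) init
      = (pvPairs S).foldl (fun c x => c.insert x.1 (c.getD x.1 0 + 1)) init := by
  simp [pvPairs, List.foldl_flatMap, List.foldl_map]

theorem pv_nestedP (S : List String) (counts : PySem.Dict String Int) (init : PySem.Dict String String) :
    S.foldl (fun d n => (pvParts n).foldl (fun d p => if counts.getD p 0 == 1 then d.insert p n else d) d) init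
      = (pvPairs S).foldl (fun d x => if counts.getD x.1 0 == 1 then d.insert x.1 x.2 else d) init := by
  simp [pvPairs, List.foldl_flatMap, List.foldl_map]

theorem pv_counts_getD (S : List String) (v : String) :
    ((pvPairs S).foldl (fun (c : PySem.Dict String Int) x => c.insert x.1 (c.getD x.1 0 + 1)) PySem.Dict.empty).getD v 0
      = (((pvPairs S).map Prod.fst).count v : Int) := by
  have h : (pvPairs S).foldl (fun (c : PySem.Dict String Int) x => c.insert x.1 (c.getD x.1 0 + 1)) PySem.Dict.empty
      = ((pvPairs S).map Prod.fst).foldl (fun c p => c.insert p (c.getD p 0 + 1)) PySem.Dict.empty := by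
    rw [List.foldl_map]
  rw [h, PySem.Dict.getD_foldl_insert_add_one]
  simp

-- the filtered-pairs list both final dicts consist of
theorem pv_ptn_items (S : List String) :
    ((pvPairs S).foldl (fun d x => if pvKeep (pvPairs S) x then d.insert x.1 x.2 else d)
        (PySem.Dict.empty : PySem.Dict String String)).items
      = (pvPairs S).filter (pvKeep (pvPairs S)) := by
  rw [PySem.List.foldl_if_eq_foldl_filter (pvKeep (pvPairs S))
      (fun (d : PySem.Dict String String) x => d.insert x.1 x.2)]
  exact pv_fresh _ (pv_keep_nodup _)

theorem pv_A_items (S : List String) :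
    (((pvPairs S).foldl (fun d x => pvStepA x.2 d x.1)
          (PySem.Dict.empty : PySem.Dict String (Option String))).items.foldl
        pvCleanStep PySem.Dict.empty).items
      = (pvPairs S).filter (pvKeep (pvPairs S)) := by
  rw [pv_match_fold, pv_gen]
  have he : (PySem.Dict.empty : PySem.Dict String (Option String)).items = [] := rfl
  rw [he]
  simp only [List.map_nil, List.nil_append]
  have hf : (pvPairs S).filter (fun x => !((PySem.Dict.empty : PySem.Dict String (Option String)).contains x.1)) = pvPairs S := by
    simp [PySem.Dict.contains_empty]
  rw [hf, pv_spec_clean]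
  exact pv_fresh _ (pv_keep_nodup _)

-- ===== VERDICT (by name: the statement is the Claim_ definition above) =====
set_option maxHeartbeats 1600000 in
theorem generate_speakers_dict_spec : Claim_equal_generate_speakers_dict := by
  intro debate _ _
  unfold Spec_generate_speakers_dict
  have hndS : (pvSpeakers debate).Nodup := PySem.Set.nodup_ofList _
  -- A side
  have hA : generate_speakers_dict debate
      = ((pvPairs (pvSpeakers debate)).filter (pvKeep (pvPairs (pvSpeakers debate))),
         ((pvSpeakers debate).foldl (fun d n => d.insert n (pvParts n))
            (PySem.Dict.empty : PySem.Dict String (List String))).items) := by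
    simp only [generate_speakers_dict, Prod.mk.injEq]
    rw [pv_prod]
    refine ⟨?_, rfl⟩
    simp only [pv_nestedA, pv_A_items]
  -- B side
  have hcounts : ((pvSpeakers debate).foldl
        (fun c name => ((((pvSpeakers debate).foldl (fun d n => d.insert n (pvParts n))
              (PySem.Dict.empty : PySem.Dict String (List String)))).getD name []).foldl
          (fun c p => c.insert p (c.getD p 0 + 1)) c)
        (PySem.Dict.empty : PySem.Dict String Int))
      = (pvPairs (pvSpeakers debate)).foldl (fun c x => c.insert x.1 (c.getD x.1 0 + 1))
          (PySem.Dict.empty : PySem.Dict String Int) := by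
    calc _ = (pvSpeakers debate).foldl
          (fun c n => (pvParts n).foldl (fun c p => c.insert p (c.getD p 0 + 1)) c)
          (PySem.Dict.empty : PySem.Dict String Int) := by
            apply PySem.List.foldl_congr_mem
            intro acc x hx
            rw [pv_ntp_getD _ hndS x hx]
      _ = _ := pv_nestedC _ _

  have hB : generate_speakers_dict_alt debate
      = ((pvPairs (pvSpeakers debate)).filter (pvKeep (pvPairs (pvSpeakers debate))),
         ((pvSpeakers debate).foldl (fun d n => d.insert n (pvParts n))
            (PySem.Dict.empty : PySem.Dict String (List String))).items) := by
    simp only [generate_speakers_dict_alt, Prod.mk.injEq]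
    refine ⟨?_, trivial⟩
    calc ((pvSpeakers debate).foldl
            (fun d name => ((((pvSpeakers debate).foldl (fun d n => d.insert n (pvParts n))
                  (PySem.Dict.empty : PySem.Dict String (List String)))).getD name []).foldl
              (fun d p =>
                if (((pvSpeakers debate).foldl
                      (fun c name => ((((pvSpeakers debate).foldl (fun d n => d.insert n (pvParts n))
                            (PySem.Dict.empty : PySem.Dict String (List String)))).getD name []).foldl
                        (fun c p => c.insert p (c.getD p 0 + 1)) c)
                      (PySem.Dict.empty : PySem.Dict String Int)).getD p 0) == 1
                then d.insert p name else d) d)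
            (PySem.Dict.empty : PySem.Dict String String)).items
        = ((pvSpeakers debate).foldl
            (fun d name => (pvParts name).foldl
              (fun d p =>
                if (((pvPairs (pvSpeakers debate)).foldl (fun c x => c.insert x.1 (c.getD x.1 0 + 1))
                      (PySem.Dict.empty : PySem.Dict String Int)).getD p 0) == 1
                then d.insert p name else d) d)
            (PySem.Dict.empty : PySem.Dict String String)).items := by
          rw [hcounts]
          congr 1
          apply PySem.List.foldl_congr_mem
          intro acc x hx
          rw [pv_ntp_getD _ hndS x hx]
          try rfl
      _ = ((pvPairs (pvSpeakers debate)).foldl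
            (fun d x =>
              if (((pvPairs (pvSpeakers debate)).foldl (fun c x => c.insert x.1 (c.getD x.1 0 + 1))
                    (PySem.Dict.empty : PySem.Dict String Int)).getD x.1 0) == 1
              then d.insert x.1 x.2 else d)
            (PySem.Dict.empty : PySem.Dict String String)).items :=
          by rw [pv_nestedP]
      _ = ((pvPairs (pvSpeakers debate)).foldl
            (fun d x => if pvKeep (pvPairs (pvSpeakers debate)) x then d.insert x.1 x.2 else d)
            (PySem.Dict.empty : PySem.Dict String String)).items := by
          apply congrArg PySem.Dict.items
          apply PySem.List.foldl_congr_mem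
          intro acc x hx
          rw [pv_counts_getD (pvSpeakers debate) x.1]
          have hbeq : ((((pvPairs (pvSpeakers debate)).map Prod.fst).count x.1 : Int) == 1)
              = (((pvPairs (pvSpeakers debate)).map Prod.fst).count x.1 == 1) := by simp
          rw [hbeq]
          rfl
      _ = _ := pv_ptn_items _
  rw [hA, hB]
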